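-- pv_equiv track=rewrite | github.com/pypi-data/pypi-mirror-330 | packages/csptlib/csptlib-1.0-py3-none-any.whl/csptlib/transplotlib.py | convert_ring
-- ===== SOURCE A (Python) =====
-- def convert_ring(ring_data: dict) -> dict:
--     """
--     将ARI信号配时环1格式转换为环2格式
--     """
--     # 初始化目标数据结构
--     ring = {
--         'yr1': [],
--         'green1': [],
--         'yr2': [],
--         'green2': [],
--         'red': []
--     }
--
--     # 按相位顺序处理数据（S1 -> S4）
--     for phase in sorted(ring_data.keys()):
--         values = ring_data[phase]
--
--         # 解包并填充数据（验证列表长度）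
--         if len(values) != 5:
--             raise ValueError(f"相位 {phase} 的数据长度不正确，预期5个元素，实际得到{len(values)}个")
--
--         ring['yr1'].append(values[0])  # 黄红灯时间1
--         ring['green1'].append(values[1])  # 绿灯时间1
--         ring['yr2'].append(values[2])  # 黄红灯时间2
--         ring['green2'].append(values[3])  # 绿灯时间2
--         ring['red'].append(values[4])  # 全红时间
--
--     return ring
-- ===== SOURCE B (Python) =====
-- def convert_ring(ring_data: dict) -> dict:
--     """
--     将ARI信号配时环1格式转换为环2格式
--     (collect sorted rows, validate, then transpose with zip)
--     """
--     rows = []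
--     for phase in sorted(ring_data):
--         row = ring_data[phase]
--         if len(row) != 5:
--             raise ValueError(f"相位 {phase} 的数据长度不正确，预期5个元素，实际得到{len(row)}个")
--         rows.append(row)
--     cols = list(zip(*rows)) if rows else [()] * 5
--     return {k: list(c) for k, c in zip(('yr1', 'green1', 'yr2', 'green2', 'red'), cols)}
-- ===== Notes on version B (the rewrite author's own statement) =====
-- stated objective: idiomatic
-- what changed: Replaces the five per-phase appends into a pre-built result dict by a collect-then-transpose decomposition: gather the sorted, validated rows first, then transpose them with zip(*rows) and label the five columns.
import Mathlib
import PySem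

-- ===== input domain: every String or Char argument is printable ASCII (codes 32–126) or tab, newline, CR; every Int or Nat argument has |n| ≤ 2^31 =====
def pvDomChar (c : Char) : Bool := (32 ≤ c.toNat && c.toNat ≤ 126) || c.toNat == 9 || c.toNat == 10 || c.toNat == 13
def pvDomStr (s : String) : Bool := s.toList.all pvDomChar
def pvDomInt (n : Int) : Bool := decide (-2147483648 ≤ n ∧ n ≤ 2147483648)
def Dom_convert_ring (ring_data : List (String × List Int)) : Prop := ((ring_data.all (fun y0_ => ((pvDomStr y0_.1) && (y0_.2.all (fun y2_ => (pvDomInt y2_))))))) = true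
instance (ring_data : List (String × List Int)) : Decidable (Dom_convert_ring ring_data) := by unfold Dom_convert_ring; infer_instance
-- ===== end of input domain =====

-- B replaces A's five per-phase appends into a prebuilt result dict by a collect-then-transpose
-- decomposition (sorted validated rows, then zip(*rows)); objective: idiomatic, same cost.


-- ===== PORT A =====
-- the five fixed-key lists of A's result dict are carried as a 5-tuple accumulator;
-- values[0..4] via pyGetD (in range under Pre_: every row has length 5)
def convert_ring (ring_data : List (String × List Int)) : List (String × List Int) :=
  let d := PySem.Dict.mk ring_data
  let fin := (PySem.List.sorted d.keys (fun s => s) false).foldl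
     (fun (acc : List Int × List Int × List Int × List Int × List Int) phase =>
       -- values = ring_data[phase], inlined five times
       (acc.1 ++ [PySem.List.pyGetD (d.getD phase []) 0 0],
        acc.2.1 ++ [PySem.List.pyGetD (d.getD phase []) 1 0],
        acc.2.2.1 ++ [PySem.List.pyGetD (d.getD phase []) 2 0],
        acc.2.2.2.1 ++ [PySem.List.pyGetD (d.getD phase []) 3 0],
        acc.2.2.2.2 ++ [PySem.List.pyGetD (d.getD phase []) 4 0]))
     ([], [], [], [], [])
  [("yr1", fin.1), ("green1", fin.2.1), ("yr2", fin.2.2.1),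
   ("green2", fin.2.2.2.1), ("red", fin.2.2.2.2)]

-- ===== PORT B =====
-- zip(*rows) ported as structural recursion building the five columns front-to-back
def pvT5 : List (List Int) → List Int × List Int × List Int × List Int × List Int
  | [] => ([], [], [], [], [])
  | r :: rs =>
    let c := pvT5 rs
    (PySem.List.pyGetD r 0 0 :: c.1,
     PySem.List.pyGetD r 1 0 :: c.2.1,
     PySem.List.pyGetD r 2 0 :: c.2.2.1,
     PySem.List.pyGetD r 3 0 :: c.2.2.2.1,
     PySem.List.pyGetD r 4 0 :: c.2.2.2.2)

def convert_ring_alt (ring_data : List (String × List Int)) : List (String × List Int) :=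
  let d := PySem.Dict.mk ring_data
  let rows := (PySem.List.sorted d.keys (fun s => s) false).map (fun p => d.getD p [])
  let c := pvT5 rows
  [("yr1", c.1), ("green1", c.2.1), ("yr2", c.2.2.1),
   ("green2", c.2.2.2.1), ("red", c.2.2.2.2)]

-- ===== PRECONDITION & SPEC =====
-- Pre_ excludes (a) rows whose length is not 5, on which A raises ValueError, and
-- (b) duplicate keys, which no Python dict input can contain (the assoc-list form is ours).
def Pre_convert_ring (ring_data : List (String × List Int)) : Prop :=
  (ring_data.map Prod.fst).Nodup ∧ ∀ p ∈ ring_data, p.2.length = 5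
instance (ring_data : List (String × List Int)) : Decidable (Pre_convert_ring ring_data) := by
  unfold Pre_convert_ring; infer_instance
def pvWitness_convert_ring : (List (String × List Int)) :=
  [("S1", [1, 2, 3, 4, 5]), ("S2", [5, 4, 3, 2, 1])]
def Spec_convert_ring (ring_data : List (String × List Int)) (out : List (String × List Int)) : Prop := out = convert_ring_alt ring_data
instance (ring_data : List (String × List Int)) (out : List (String × List Int)) : Decidable (Spec_convert_ring ring_data out) := by unfold Spec_convert_ring; infer_instance

-- ===== CLAIM (what is proved, stated in full; the proofs are below) =====
def Claim_equal_convert_ring : Prop := ∀ (ring_data : List (String × List Int)), Dom_convert_ring ring_data → Pre_convert_ring ring_data → Spec_convert_ring ring_data (convert_ring ring_data)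

-- ===== LEMMAS AND PROOFS =====

-- A's append-accumulator fold over the sorted keys computes acc ++ the transposed row columns
theorem pvFold_keys (d : PySem.Dict String (List Int)) (ks : List String)
    (acc : List Int × List Int × List Int × List Int × List Int) :
    ks.foldl
      (fun acc phase =>
        (acc.1 ++ [PySem.List.pyGetD (d.getD phase []) 0 0],
         acc.2.1 ++ [PySem.List.pyGetD (d.getD phase []) 1 0],
         acc.2.2.1 ++ [PySem.List.pyGetD (d.getD phase []) 2 0],
         acc.2.2.2.1 ++ [PySem.List.pyGetD (d.getD phase []) 3 0],
         acc.2.2.2.2 ++ [PySem.List.pyGetD (d.getD phase []) 4 0])) acc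
    = (acc.1 ++ (pvT5 (ks.map (fun p => d.getD p []))).1,
       acc.2.1 ++ (pvT5 (ks.map (fun p => d.getD p []))).2.1,
       acc.2.2.1 ++ (pvT5 (ks.map (fun p => d.getD p []))).2.2.1,
       acc.2.2.2.1 ++ (pvT5 (ks.map (fun p => d.getD p []))).2.2.2.1,
       acc.2.2.2.2 ++ (pvT5 (ks.map (fun p => d.getD p []))).2.2.2.2) := by
  induction ks generalizing acc with
  | nil => simp [pvT5]
  | cons k ks ih => simp [pvT5, List.foldl_cons, ih]

-- ===== VERDICT (by name: the statement is the Claim_ definition above) =====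
theorem convert_ring_spec : Claim_equal_convert_ring := by
  intro ring_data _ _
  show convert_ring ring_data = convert_ring_alt ring_data
  simp only [convert_ring, convert_ring_alt]
  rw [pvFold_keys]
  simp
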